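-- pv_equiv track=rewrite | github.com/miliar/Code_Jam_Webscraper | solutions_python/Problem_138/1334.py | solve_case_flip
-- ===== SOURCE A (Python) =====
-- def solve_case_flip(Na_list, Ke_list):
--     N_list = Na_list
--     K_list = Ke_list
--     points = 0
--     for block in K_list:
--         larger_list = []
--         for b in N_list:
--             if b > block:
--                 larger_list.append(b)
--         if larger_list == []:
--             points += 1
--             N_list.remove(N_list[0])
--         else:
--             N_list.remove(larger_list[0])
--
--     return len(K_list)-points
-- ===== SOURCE B (Python) =====
-- # Segment tree over positions (subtree max + alive count): each block deletes the
-- # leftmost survivor greater than it, else the leftmost survivor -- O((n+k) log n).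
-- def _mx(t):
--     return (t[1] if t[2] else None) if t[0] == 'leaf' else t[1]
--
-- def _cnt(t):
--     return (1 if t[2] else 0) if t[0] == 'leaf' else t[2]
--
-- def _combine(a, b):
--     return b if a is None else (a if b is None else max(a, b))
--
-- def _gt(m, block):
--     return m is not None and m > block
--
-- def _build(xs):
--     if len(xs) <= 1:
--         if not xs:
--             return ('leaf', 0, False)
--         return ('leaf', xs[0], True)
--     m = len(xs) // 2
--     l = _build(xs[:m])
--     r = _build(xs[m:])
--     return ('node', _combine(_mx(l), _mx(r)), _cnt(l) + _cnt(r), l, r)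
--
-- def _del_gt(t, block):
--     if t[0] == 'leaf':
--         return ('leaf', t[1], False)
--     l, r = t[3], t[4]
--     if _gt(_mx(l), block):
--         l = _del_gt(l, block)
--     else:
--         r = _del_gt(r, block)
--     return ('node', _combine(_mx(l), _mx(r)), _cnt(l) + _cnt(r), l, r)
--
-- def _del_left(t):
--     if t[0] == 'leaf':
--         return ('leaf', t[1], False)
--     l, r = t[3], t[4]
--     if _cnt(l) > 0:
--         l = _del_left(l)
--     else:
--         r = _del_left(r)
--     return ('node', _combine(_mx(l), _mx(r)), _cnt(l) + _cnt(r), l, r)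
--
-- def solve_case_flip(Na_list, Ke_list):
--     if not Na_list:
--         return 0
--     t = _build(Na_list)
--     matched = 0
--     for block in Ke_list:
--         if _gt(_mx(t), block):
--             t = _del_gt(t, block)
--             matched += 1
--         else:
--             t = _del_left(t)
--     return matched
-- ===== Notes on version B (the rewrite author's own statement) =====
-- stated objective: faster
-- what changed: A re-scans and remove()s from the surviving list for every block (quadratic); B builds a segment tree over positions storing subtree max and alive count and deletes the leftmost survivor greater than the block (or the leftmost survivor) in O(log n) per block.
import Mathlib
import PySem

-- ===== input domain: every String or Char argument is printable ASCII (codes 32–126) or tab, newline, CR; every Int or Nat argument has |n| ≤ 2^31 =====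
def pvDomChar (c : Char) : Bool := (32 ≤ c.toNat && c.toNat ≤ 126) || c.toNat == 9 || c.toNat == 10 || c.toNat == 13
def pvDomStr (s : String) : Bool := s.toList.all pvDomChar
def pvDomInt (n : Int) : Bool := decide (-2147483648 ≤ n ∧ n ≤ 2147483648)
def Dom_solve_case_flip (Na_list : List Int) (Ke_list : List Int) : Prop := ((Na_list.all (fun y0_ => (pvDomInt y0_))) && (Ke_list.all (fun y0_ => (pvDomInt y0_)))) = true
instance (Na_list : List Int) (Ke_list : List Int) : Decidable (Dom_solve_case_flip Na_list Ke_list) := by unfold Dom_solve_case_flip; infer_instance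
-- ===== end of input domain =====

-- B replaces A's quadratic scan-and-remove simulation by a segment tree over positions
-- (subtree max + alive count), O((n+k) log n); return-value equivalence only: A empties Na_list in place.

-- ===== PORT A =====
def stepA (st : List Int × Int) (block : Int) : List Int × Int :=
  let larger := st.1.foldl (fun acc b => if b > block then acc ++ [b] else acc) []
  if larger = [] then
    ((PySem.List.remove? st.1 ((PySem.List.pyGet? st.1 0).getD 0)).getD st.1, st.2 + 1)
  else
    ((PySem.List.remove? st.1 ((PySem.List.pyGet? larger 0).getD 0)).getD st.1, st.2)

def solve_case_flip (Na_list : List Int) (Ke_list : List Int) : Int :=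
  (Ke_list.length : Int) - (Ke_list.foldl stepA (Na_list, 0)).2

-- ===== PORT B =====
inductive STree where
  | leaf : Int → Bool → STree
  | node : Option Int → Nat → STree → STree → STree
deriving DecidableEq, Repr

def mxOf : STree → Option Int
  | .leaf v a => if a then some v else none
  | .node m _ _ _ => m

def cntOf : STree → Nat
  | .leaf _ a => if a then 1 else 0
  | .node _ c _ _ => c

def combineMx : Option Int → Option Int → Option Int
  | none, b => b
  | some a, none => some a
  | some a, some b => some (max a b)

def optGt : Option Int → Int → Bool
  | none, _ => false
  | some m, block => m > block

def buildT (xs : List Int) : STree :=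
  if _h : xs.length ≤ 1 then
    match xs with
    | [] => .leaf 0 false
    | x :: _ => .leaf x true
  else
    let m := xs.length / 2
    let l := buildT (xs.take m)
    let r := buildT (xs.drop m)
    .node (combineMx (mxOf l) (mxOf r)) (cntOf l + cntOf r) l r
termination_by xs.length
decreasing_by
  · simp; omega
  · simp; omega

def delGt : STree → Int → STree
  | .leaf v _, _ => .leaf v false
  | .node _ _ l r, block =>
    if optGt (mxOf l) block then
      let l' := delGt l block
      .node (combineMx (mxOf l') (mxOf r)) (cntOf l' + cntOf r) l' r
    else
      let r' := delGt r block
      .node (combineMx (mxOf l) (mxOf r')) (cntOf l + cntOf r') l r'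

def delLeft : STree → STree
  | .leaf v _ => .leaf v false
  | .node _ _ l r =>
    if cntOf l > 0 then
      let l' := delLeft l
      .node (combineMx (mxOf l') (mxOf r)) (cntOf l' + cntOf r) l' r
    else
      let r' := delLeft r
      .node (combineMx (mxOf l) (mxOf r')) (cntOf l + cntOf r') l r'

def solve_case_flip_alt (Na_list : List Int) (Ke_list : List Int) : Int :=
  if Na_list = [] then 0
  else
    (Ke_list.foldl (fun (st : STree × Int) block =>
      if optGt (mxOf st.1) block then (delGt st.1 block, st.2 + 1)
      else (delLeft st.1, st.2)) (buildT Na_list, 0)).2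

-- ===== PRECONDITION & SPEC =====
-- A raises IndexError (N_list[0] on the emptied list) exactly when there are more blocks
-- than naomi-values; Pre_ excludes those inputs and nothing else.
def Pre_solve_case_flip (Na_list : List Int) (Ke_list : List Int) : Prop :=
  Ke_list.length ≤ Na_list.length
instance (Na_list : List Int) (Ke_list : List Int) : Decidable (Pre_solve_case_flip Na_list Ke_list) := by
  unfold Pre_solve_case_flip; infer_instance

def pvWitness_solve_case_flip : List Int × List Int := ([3, 1, 2], [2, 2])

def Spec_solve_case_flip (Na_list : List Int) (Ke_list : List Int) (out : Int) : Prop := out = solve_case_flip_alt Na_list Ke_list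
instance (Na_list : List Int) (Ke_list : List Int) (out : Int) : Decidable (Spec_solve_case_flip Na_list Ke_list out) := by unfold Spec_solve_case_flip; infer_instance

-- ===== CLAIM (what is proved, stated in full; the proofs are below) =====
def Claim_equal_solve_case_flip : Prop := ∀ (Na_list : List Int) (Ke_list : List Int), Dom_solve_case_flip Na_list Ke_list → Pre_solve_case_flip Na_list Ke_list → Spec_solve_case_flip Na_list Ke_list (solve_case_flip Na_list Ke_list)

-- ===== LEMMAS AND PROOFS =====

-- list-level model of one "delete leftmost survivor greater than b" step
def removeFirstGt (b : Int) : List Int → List Int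
  | [] => []
  | x :: xs => if b < x then xs else x :: removeFirstGt b xs

def toListT : STree → List Int
  | .leaf v a => if a then [v] else []
  | .node _ _ l r => toListT l ++ toListT r

def InvT : STree → Prop
  | .leaf _ _ => True
  | .node m c l r => InvT l ∧ InvT r ∧ m = combineMx (mxOf l) (mxOf r) ∧ c = cntOf l + cntOf r

-- number of matched blocks of the sequential process, list-level
def matchedCount : List Int → List Int → Nat
  | _, [] => 0
  | N, b :: K =>
    if N.any (fun x => decide (b < x)) then 1 + matchedCount (removeFirstGt b N) K
    else matchedCount N.tail K

theorem InvT_node (m : Option Int) (c : Nat) (l r : STree) :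
    InvT (.node m c l r) ↔ InvT l ∧ InvT r ∧ m = combineMx (mxOf l) (mxOf r) ∧ c = cntOf l + cntOf r := Iff.rfl
theorem delGt_node (m : Option Int) (c : Nat) (l r : STree) (b : Int) :
    delGt (.node m c l r) b =
      if optGt (mxOf l) b then
        .node (combineMx (mxOf (delGt l b)) (mxOf r)) (cntOf (delGt l b) + cntOf r) (delGt l b) r
      else
        .node (combineMx (mxOf l) (mxOf (delGt r b))) (cntOf l + cntOf (delGt r b)) l (delGt r b) := rfl
theorem delLeft_node (m : Option Int) (c : Nat) (l r : STree) :
    delLeft (.node m c l r) =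
      if cntOf l > 0 then
        .node (combineMx (mxOf (delLeft l)) (mxOf r)) (cntOf (delLeft l) + cntOf r) (delLeft l) r
      else
        .node (combineMx (mxOf l) (mxOf (delLeft r))) (cntOf l + cntOf (delLeft r)) l (delLeft r) := rfl

theorem cntOf_node (m : Option Int) (c : Nat) (l r : STree) : cntOf (.node m c l r) = c := rfl
theorem mxOf_node (m : Option Int) (c : Nat) (l r : STree) : mxOf (.node m c l r) = m := rfl
theorem toListT_node (m : Option Int) (c : Nat) (l r : STree) :
    toListT (.node m c l r) = toListT l ++ toListT r := rfl

theorem cntOf_eq (t : STree) (h : InvT t) : cntOf t = (toListT t).length := by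
  induction t with
  | leaf v a => cases a <;> simp [cntOf, toListT]
  | node m c l r ihl ihr =>
    obtain ⟨hl, hr, hm, hc⟩ := h
    rw [cntOf_node, toListT_node, List.length_append, hc, ihl hl, ihr hr]

theorem optGt_combine (a c : Option Int) (b : Int) :
    optGt (combineMx a c) b = (optGt a b || optGt c b) := by
  cases a <;> cases c <;> simp [optGt, combineMx]

theorem optGt_mx (t : STree) (h : InvT t) (b : Int) :
    optGt (mxOf t) b = (toListT t).any (fun x => decide (b < x)) := by
  induction t with
  | leaf v a => cases a <;> simp [mxOf, toListT, optGt]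
  | node m c l r ihl ihr =>
    obtain ⟨hl, hr, hm, hc⟩ := h
    rw [mxOf_node, toListT_node, hm, optGt_combine, ihl hl, ihr hr, List.any_append]

theorem buildT_spec (xs : List Int) : toListT (buildT xs) = xs ∧ InvT (buildT xs) := by
  induction xs using buildT.induct with
  | case1 =>
    simp [buildT, toListT, InvT]
  | case2 x tail h _ =>
    have htail : tail = [] := by
      cases tail with
      | nil => rfl
      | cons _ _ => simp at h
    subst htail
    simp [buildT, toListT, InvT]
  | case3 xs h mm ihl ihr =>
    rw [buildT]
    simp only [dif_neg h]
    refine ⟨?_, (InvT_node _ _ _ _).mpr ⟨ihl.2, ihr.2, rfl, rfl⟩⟩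
    rw [toListT_node, ihl.1, ihr.1, List.take_append_drop]

theorem rfg_append_left (b : Int) (L R : List Int) (h : L.any (fun x => decide (b < x)) = true) :
    removeFirstGt b (L ++ R) = removeFirstGt b L ++ R := by
  induction L with
  | nil => simp at h
  | cons x L ih =>
    by_cases hx : b < x
    · simp [removeFirstGt, hx]
    · simp only [List.any_cons] at h
      have h' : L.any (fun x => decide (b < x)) = true := by
        rcases Bool.or_eq_true_iff.mp h with h1 | h1
        · exact absurd (of_decide_eq_true h1) hx
        · exact h1
      simp [removeFirstGt, hx, ih h']

theorem rfg_append_right (b : Int) (L R : List Int) (h : L.any (fun x => decide (b < x)) = false) :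
    removeFirstGt b (L ++ R) = L ++ removeFirstGt b R := by
  induction L with
  | nil => simp
  | cons x L ih =>
    simp only [List.any_cons, Bool.or_eq_false_iff] at h
    have hx : ¬ b < x := by simpa using h.1
    simp [removeFirstGt, hx, ih h.2]

theorem rfg_length (b : Int) (L : List Int) (h : L.any (fun x => decide (b < x)) = true) :
    (removeFirstGt b L).length + 1 = L.length := by
  induction L with
  | nil => simp at h
  | cons x L ih =>
    by_cases hx : b < x
    · simp [removeFirstGt, hx]
    · simp only [List.any_cons] at h
      have h' : L.any (fun x => decide (b < x)) = true := by
        rcases Bool.or_eq_true_iff.mp h with h1 | h1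
        · exact absurd (of_decide_eq_true h1) hx
        · exact h1
      simp [removeFirstGt, hx, ih h']

theorem delGt_spec (t : STree) (b : Int) (h : InvT t) (hg : optGt (mxOf t) b = true) :
    toListT (delGt t b) = removeFirstGt b (toListT t) ∧ InvT (delGt t b) := by
  induction t with
  | leaf v a =>
    cases a
    · simp [mxOf, optGt] at hg
    · simp only [mxOf, optGt, decide_eq_true_eq, if_true] at hg
      simp [delGt, toListT, removeFirstGt, hg, InvT]
  | node m c l r ihl ihr =>
    obtain ⟨hl, hr, hm, hc⟩ := h
    rw [mxOf_node, hm, optGt_combine] at hg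
    by_cases hgl : optGt (mxOf l) b = true
    · obtain ⟨e, inv⟩ := ihl hl hgl
      have hany : (toListT l).any (fun x => decide (b < x)) = true := by
        rw [← optGt_mx l hl b]; exact hgl
      rw [delGt_node, if_pos hgl]
      refine ⟨?_, (InvT_node _ _ _ _).mpr ⟨inv, hr, rfl, rfl⟩⟩
      rw [toListT_node, toListT_node, e, rfg_append_left b _ _ hany]
    · have hgr : optGt (mxOf r) b = true := by
        rcases Bool.or_eq_true_iff.mp hg with h1 | h1
        · exact absurd h1 hgl
        · exact h1
      obtain ⟨e, inv⟩ := ihr hr hgr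
      have hany : (toListT l).any (fun x => decide (b < x)) = false := by
        rw [← optGt_mx l hl b]; exact Bool.not_eq_true _ ▸ eq_false_of_ne_true hgl
      rw [delGt_node, if_neg (by simp [hgl])]
      refine ⟨?_, (InvT_node _ _ _ _).mpr ⟨hl, inv, rfl, rfl⟩⟩
      rw [toListT_node, toListT_node, e, rfg_append_right b _ _ hany]

theorem delLeft_spec (t : STree) (h : InvT t) :
    toListT (delLeft t) = (toListT t).tail ∧ InvT (delLeft t) := by
  induction t with
  | leaf v a => cases a <;> simp [delLeft, toListT, InvT]
  | node m c l r ihl ihr =>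
    obtain ⟨hl, hr, hm, hc⟩ := h
    obtain ⟨el, invl⟩ := ihl hl
    obtain ⟨er, invr⟩ := ihr hr
    by_cases hcl : cntOf l > 0
    · have hne : toListT l ≠ [] := by
        intro hnil
        rw [cntOf_eq l hl, hnil] at hcl
        simp at hcl
      rw [delLeft_node, if_pos hcl]
      refine ⟨?_, (InvT_node _ _ _ _).mpr ⟨invl, hr, rfl, rfl⟩⟩
      rw [toListT_node, toListT_node, el]
      exact (List.tail_append_of_ne_nil hne).symm
    · have hnil : toListT l = [] := by
        rw [cntOf_eq l hl] at hcl
        exact List.length_eq_zero_iff.mp (by omega)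
      rw [delLeft_node, if_neg hcl]
      refine ⟨?_, (InvT_node _ _ _ _).mpr ⟨hl, invr, rfl, rfl⟩⟩
      rw [toListT_node, toListT_node, er, hnil]
      simp

theorem foldB (K : List Int) (t : STree) (m : Int) (h : InvT t) :
    (K.foldl (fun (st : STree × Int) block =>
      if optGt (mxOf st.1) block then (delGt st.1 block, st.2 + 1)
      else (delLeft st.1, st.2)) (t, m)).2 = m + (matchedCount (toListT t) K : Int) := by
  induction K generalizing t m with
  | nil => simp [matchedCount]
  | cons b K ih =>
    simp only [List.foldl_cons, matchedCount]
    rw [← optGt_mx t h b]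
    by_cases hg : optGt (mxOf t) b = true
    · obtain ⟨e, inv⟩ := delGt_spec t b h hg
      simp only [hg, if_pos, ih _ _ inv, e]
      push_cast
      ring
    · rw [Bool.not_eq_true] at hg
      obtain ⟨e, inv⟩ := delLeft_spec t h
      simp only [hg, Bool.false_eq_true, if_false, ih _ _ inv, e]

theorem remove_first_filter (N : List Int) (b x : Int) (rest : List Int)
    (h : N.filter (fun y => decide (b < y)) = x :: rest) :
    PySem.List.remove? N x = some (removeFirstGt b N) := by
  induction N generalizing rest with
  | nil => simp at h
  | cons y N ih =>
    by_cases hy : b < y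
    · rw [List.filter_cons_of_pos (by simpa using hy)] at h
      obtain ⟨rfl, -⟩ : y = x ∧ List.filter (fun y => decide (b < y)) N = rest := by
        exact ⟨(List.cons.injEq _ _ _ _ ▸ h).1, (List.cons.injEq _ _ _ _ ▸ h).2⟩
      simp [PySem.List.remove?_cons_self, removeFirstGt, hy]
    · rw [List.filter_cons_of_neg (by simpa using hy)] at h
      have hbx : b < x := by
        have hx : x ∈ List.filter (fun y => decide (b < y)) N := h ▸ List.mem_cons_self
        simpa using (List.mem_filter.mp hx).2
      have hne : y ≠ x := fun e => hy (e ▸ hbx)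
      rw [PySem.List.remove?_cons_of_ne N hne, ih _ h]
      simp [removeFirstGt, hy]

theorem foldA (K N : List Int) (p : Int) (hlen : K.length ≤ N.length) :
    (K.foldl stepA (N, p)).2 = p + (K.length : Int) - (matchedCount N K : Int) := by
  induction K generalizing N p with
  | nil => simp [matchedCount]
  | cons b K ih =>
    simp only [List.foldl_cons, matchedCount]
    rw [show stepA (N, p) b = (let larger := N.foldl (fun acc x => if x > b then acc ++ [x] else acc) []
      if larger = [] then
        ((PySem.List.remove? N ((PySem.List.pyGet? N 0).getD 0)).getD N, p + 1)
      else
        ((PySem.List.remove? N ((PySem.List.pyGet? larger 0).getD 0)).getD N, p)) from rfl]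
    rw [PySem.List.foldl_append_ite_eq_filter (fun x => x > b)]
    simp only [List.nil_append]
    rcases hfil : List.filter (fun x => decide (x > b)) N with _ | ⟨x, rest⟩
    · -- no survivor beats the block: A scores a point and drops the head
      have hanyf : N.any (fun x => decide (b < x)) = false := by
        rw [List.any_eq_false]
        intro x hx
        simp only [decide_eq_true_eq]
        have := List.filter_eq_nil_iff.mp hfil x hx
        simpa using this
      cases N with
      | nil => simp at hlen
      | cons hN tN =>
        simp only [PySem.List.pyGet?_zero_cons, Option.getD_some,
          PySem.List.remove?_cons_self, hanyf, Bool.false_eq_true, List.tail_cons, if_true, if_false]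
        rw [ih tN (p + 1) (by simp only [List.length_cons] at hlen ⊢; omega)]
        simp only [List.length_cons]
        push_cast
        ring
    · -- the first survivor beating the block is removed
      have hx0 : PySem.List.pyGet? (x :: rest) 0 = some x := PySem.List.pyGet?_zero_cons x rest
      have hrem := remove_first_filter N b x rest (by simpa using hfil)
      have hany : N.any (fun x => decide (b < x)) = true := by
        rw [List.any_eq_true]
        have hx : x ∈ List.filter (fun x => decide (x > b)) N := hfil ▸ List.mem_cons_self
        exact ⟨x, (List.mem_filter.mp hx).1, (List.mem_filter.mp hx).2⟩
      have hlen' : K.length ≤ (removeFirstGt b N).length := by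
        have := rfg_length b N hany
        simp only [List.length_cons] at hlen
        omega
      simp only [hx0, Option.getD_some, hrem, hany, if_true, if_false, reduceCtorEq]
      rw [ih (removeFirstGt b N) p hlen']
      simp only [List.length_cons]
      push_cast
      ring

-- ===== VERDICT (by name: the statement is the Claim_ definition above) =====
theorem solve_case_flip_spec : Claim_equal_solve_case_flip := by
  intro N K _ hpre
  unfold Spec_solve_case_flip solve_case_flip solve_case_flip_alt
  rw [foldA K N 0 hpre]
  by_cases hN : N = []
  · subst hN
    have : K = [] := by
      cases K with
      | nil => rfl
      | cons a l => simp [Pre_solve_case_flip] at hpre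
    subst this
    simp [matchedCount]
  · simp only [if_neg hN]
    obtain ⟨h1, h2⟩ := buildT_spec N
    rw [foldB K (buildT N) 0 h2, h1]
    ring
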